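-- pv_equiv track=rewrite | github.com/BrianMH/Dev_Learning | mit101/recipes/lab.py | make_recipe_book
-- ===== SOURCE A (Python) =====
-- def make_recipe_book(recipes):
--     """
--     Given recipes, a list containing compound and atomic food items, make and
--     return a dictionary that maps each compound food item name to a list
--     of all the ingredient lists associated with that name.
--     """
--     recipeDict = dict()
--
--     for item in recipes:
--         fType, fName, fComp = item
--         if fType == 'compound':
--             if fName in recipeDict:
--                 recipeDict[fName].append(fComp.copy())
--             else:
--                 recipeDict[fName] = [fComp.copy()]
--
--     return recipeDict
-- ===== SOURCE B (Python) =====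
-- def make_recipe_book(recipes):
--     """
--     Given recipes, a list containing compound and atomic food items, make and
--     return a dictionary that maps each compound food item name to a list
--     of all the ingredient lists associated with that name.
--     """
--     names = dict.fromkeys(fName for fType, fName, _ in recipes
--                           if fType == 'compound')
--     return {name: [fComp.copy() for fType, n, fComp in recipes
--                    if fType == 'compound' and n == name]
--             for name in names}
-- ===== Notes on version B (the rewrite author's own statement) =====
-- stated objective: alternative
-- what changed: Replaces A's single accumulating dict pass with a two-phase build: first collect the distinct compound names in first-occurrence order (dict.fromkeys), then construct each name's ingredient-list group by a comprehension scanning the recipes, assembling the dict in one comprehension.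
import Mathlib
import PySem

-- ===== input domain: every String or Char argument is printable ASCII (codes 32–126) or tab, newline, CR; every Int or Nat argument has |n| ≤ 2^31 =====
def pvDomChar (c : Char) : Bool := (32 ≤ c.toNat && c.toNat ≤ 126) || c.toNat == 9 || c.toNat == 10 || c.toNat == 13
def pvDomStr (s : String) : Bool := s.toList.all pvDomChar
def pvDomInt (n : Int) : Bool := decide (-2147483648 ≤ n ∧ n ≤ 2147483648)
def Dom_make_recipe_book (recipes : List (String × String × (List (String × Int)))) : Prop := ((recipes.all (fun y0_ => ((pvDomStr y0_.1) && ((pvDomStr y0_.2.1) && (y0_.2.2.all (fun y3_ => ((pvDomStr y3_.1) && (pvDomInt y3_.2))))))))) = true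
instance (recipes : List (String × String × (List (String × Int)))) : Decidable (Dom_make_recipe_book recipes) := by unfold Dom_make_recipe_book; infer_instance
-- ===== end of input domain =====

-- B groups by a two-phase build (distinct names first, then one scan per name) instead of A's
-- single accumulating dict pass; alternative decomposition, same return value.

-- ===== PORT A =====
def make_recipe_book (recipes : List (String × String × (List (String × Int)))) : List (String × List (List (String × Int))) :=
  (recipes.foldl (fun recipeDict item =>
      let fType := item.1
      let fName := item.2.1
      let fComp := item.2.2
      if fType == "compound" then
        if recipeDict.contains fName then
          recipeDict.modify fName [] (fun l => l ++ [fComp])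
        else
          recipeDict.insert fName [fComp]
      else recipeDict)
    (PySem.Dict.empty : PySem.Dict String (List (List (String × Int))))).items

-- ===== PORT B =====
def make_recipe_book_alt (recipes : List (String × String × (List (String × Int)))) : List (String × List (List (String × Int))) :=
  let names := PySem.List.dedup
    ((recipes.filter (fun r => r.1 == "compound")).map (fun r => r.2.1))
  names.map (fun name =>
    (name, (recipes.filter (fun r => r.1 == "compound" && r.2.1 == name)).map (fun r => r.2.2)))

-- ===== PRECONDITION & SPEC =====
def Spec_make_recipe_book (recipes : List (String × String × (List (String × Int)))) (out : List (String × List (List (String × Int)))) : Prop := out = make_recipe_book_alt recipes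
instance (recipes : List (String × String × (List (String × Int)))) (out : List (String × List (List (String × Int)))) : Decidable (Spec_make_recipe_book recipes out) := by unfold Spec_make_recipe_book; infer_instance

-- ===== CLAIM (what is proved, stated in full; the proofs are below) =====
def Claim_equal_make_recipe_book : Prop := ∀ (recipes : List (String × String × (List (String × Int)))), Dom_make_recipe_book recipes → Spec_make_recipe_book recipes (make_recipe_book recipes)

-- ===== LEMMAS AND PROOFS =====
theorem make_recipe_book_eq_alt : ∀ recipes, make_recipe_book recipes = make_recipe_book_alt recipes := by
  intro recipes
  unfold make_recipe_book make_recipe_book_alt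
  simp only []
  -- step 1: drop the guard (fold over the filtered list)
  have hstep1 := PySem.List.foldl_if_eq_foldl_filter
    (p := fun (r : String × String × List (String × Int)) => r.1 == "compound")
    (f := fun (d : PySem.Dict String (List (List (String × Int)))) r =>
      if d.contains r.2.1 then d.modify r.2.1 [] (fun l => l ++ [r.2.2])
      else d.insert r.2.1 [r.2.2])
    (l := recipes) (init := PySem.Dict.empty)
  rw [hstep1]
  -- step 2: replace the contains-branch by modify
  have hstep2 := PySem.List.foldl_congr_mem
    (l := recipes.filter (fun r => r.1 == "compound"))
    (f := fun (d : PySem.Dict String (List (List (String × Int)))) r =>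
      if d.contains r.2.1 then d.modify r.2.1 [] (fun l => l ++ [r.2.2])
      else d.insert r.2.1 [r.2.2])
    (g := fun d (r : String × String × List (String × Int)) =>
        d.modify r.2.1 [] (fun l => l ++ [r.2.2]))
    (init := PySem.Dict.empty)
    (by
        intro acc x hx
        by_cases h : acc.contains x.2.1
        · simp [h]
        · have hg := PySem.Dict.getD_of_not_contains (d := acc) (k := x.2.1)
            (d0 := ([] : List (List (String × Int)))) (by simpa using h)
          simp [h, PySem.Dict.modify, hg])
  rw [hstep2]
  -- step 3: fold over pairs
  set comp := recipes.filter (fun r => r.1 == "compound") with hcomp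
  have hpairs : comp.foldl (fun d (r : String × String × List (String × Int)) =>
        d.modify r.2.1 [] (fun l => l ++ [r.2.2])) PySem.Dict.empty
      = (comp.map (fun r => (r.2.1, r.2.2))).foldl
          (fun d (p : String × List (String × Int)) => d.modify p.1 [] (fun l => l ++ [p.2]))
          PySem.Dict.empty := by
    rw [List.foldl_map]
  rw [hpairs]
  set pairs := comp.map (fun r => (r.2.1, r.2.2)) with hp
  set D := pairs.foldl (fun d (p : String × List (String × Int)) => d.modify p.1 [] (fun l => l ++ [p.2])) PySem.Dict.empty with hD
  -- keys
  have hnodup : D.keys.Nodup := by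
    rw [hD]
    exact PySem.Dict.nodup_keys_foldl_modify_key pairs Prod.fst [] _ _ (by simp)
  have hkeys : D.keys = PySem.List.dedup (comp.map (fun r => r.2.1)) := by
    rw [hD, PySem.Dict.keys_foldl_modify_key]
    simp [hp, List.map_map, PySem.Set.update_nil_left, Function.comp_def]
  have hitems : D.items = D.keys.map (fun k => (k, D.getD k [])) :=
    PySem.Dict.items_eq_map_keys D hnodup []
  rw [hitems, hkeys]
  apply List.map_congr_left
  intro name hname
  have hgetD : D.getD name [] = (pairs.filter (fun p => p.1 == name)).map (·.2) := by
    rw [hD, PySem.Dict.getD_foldl_modify_append]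
    simp
  congr 1
  rw [hgetD, hp, List.filter_map, List.map_map, hcomp, List.filter_filter]
  have hsw : List.filter (fun (a : String × String × List (String × Int)) =>
        ((fun (p : String × List (String × Int)) => p.1 == name) ∘ fun r => (r.2.1, r.2.2)) a
          && (a.1 == "compound")) recipes
      = List.filter (fun r => r.1 == "compound" && r.2.1 == name) recipes :=
    List.filter_congr (fun a _ => by simp [Bool.and_comm])
  rw [hsw]
  exact List.map_congr_left (fun a _ => rfl)

-- ===== VERDICT (by name: the statement is the Claim_ definition above) =====
theorem make_recipe_book_spec : Claim_equal_make_recipe_book := by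
  intro recipes _
  exact make_recipe_book_eq_alt recipes
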